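-- pv_equiv track=rewrite | github.com/Mauricio-Trejo/PROG-2025 | posicion_vocales.py | ubicadorDeVocales
-- ===== SOURCE A (Python) =====
-- def ubicadorDeVocales(cadena):
--     elementos = 'aeiou'
--     cadenaN = cadena.lower()
--     vocales = {vocal: [] for vocal in elementos} #Inicializamos el diccionario
--
--     for index, letra in enumerate(cadenaN):
--         #enumerate() devuelve un iterable con n tuplas (index, cadena[index])
--         if letra in vocales:
--             vocales[letra].append(index)
--
--     return vocales
-- ===== SOURCE B (Python) =====
-- def ubicadorDeVocales(cadena):
--     cadenaN = cadena.lower()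
--     return {vocal: [i for i, c in enumerate(cadenaN) if c == vocal]
--             for vocal in 'aeiou'}
-- ===== Notes on version B (the rewrite author's own statement) =====
-- stated objective: simpler
-- what changed: Replaces the single membership-dispatch pass that mutates a pre-initialised dict with a dict comprehension that iterates over the five vowels and rescans the lowercased string per vowel, collecting indices by comprehension.
import Mathlib
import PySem

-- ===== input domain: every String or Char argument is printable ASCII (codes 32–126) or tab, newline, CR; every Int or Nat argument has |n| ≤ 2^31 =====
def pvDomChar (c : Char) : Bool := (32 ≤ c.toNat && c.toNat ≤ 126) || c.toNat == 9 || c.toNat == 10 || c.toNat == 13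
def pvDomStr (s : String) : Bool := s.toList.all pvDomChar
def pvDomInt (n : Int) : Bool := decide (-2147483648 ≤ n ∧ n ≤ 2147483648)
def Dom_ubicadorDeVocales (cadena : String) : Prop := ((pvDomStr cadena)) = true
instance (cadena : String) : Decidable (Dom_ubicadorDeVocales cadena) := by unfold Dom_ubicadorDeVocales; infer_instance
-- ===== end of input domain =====

-- B replaces A's single membership-dispatch pass over the string (mutating a pre-initialised
-- dict) with a dict comprehension over the five vowels, rescanning the string per vowel (simpler).


-- ===== PORT A =====
-- elementos = 'aeiou'
def pvElementos : List Char := ['a', 'e', 'i', 'o', 'u']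

def ubicadorDeVocales (cadena : String) : List (String × List Int) :=
  let cadenaN := PySem.Chars.lower cadena.toList
  -- vocales = {vocal: [] for vocal in elementos}
  let vocales : PySem.Dict String (List Int) :=
    pvElementos.foldl (fun d vocal => d.insert (String.ofList [vocal]) []) PySem.Dict.empty
  -- for index, letra in enumerate(cadenaN): if letra in vocales: vocales[letra].append(index)
  let vocales :=
    (PySem.List.enumerate cadenaN 0).foldl
      (fun d p =>
        if d.contains (String.ofList [p.2]) then
          d.modify (String.ofList [p.2]) [] (fun l => l ++ [p.1])
        else d)
      vocales
  vocales.items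

-- ===== PORT B =====
def ubicadorDeVocales_alt (cadena : String) : List (String × List Int) :=
  let cadenaN := PySem.Chars.lower cadena.toList
  pvElementos.map (fun vocal =>
    (String.ofList [vocal],
     (PySem.List.enumerate cadenaN 0).filterMap
       (fun p => if p.2 = vocal then some p.1 else none)))

-- ===== PRECONDITION & SPEC =====
def Spec_ubicadorDeVocales (cadena : String) (out : List (String × List Int)) : Prop := out = ubicadorDeVocales_alt cadena
instance (cadena : String) (out : List (String × List Int)) : Decidable (Spec_ubicadorDeVocales cadena out) := by unfold Spec_ubicadorDeVocales; infer_instance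

-- ===== CLAIM (what is proved, stated in full; the proofs are below) =====
def Claim_equal_ubicadorDeVocales : Prop := ∀ (cadena : String), Dom_ubicadorDeVocales cadena → Spec_ubicadorDeVocales cadena (ubicadorDeVocales cadena)

-- ===== LEMMAS AND PROOFS =====

theorem ofList_singleton_inj {c c' : Char} : (String.ofList [c] = String.ofList [c']) ↔ c = c' := by
  constructor
  · intro h; have := congrArg String.toList h; simpa using this
  · rintro rfl; rfl

-- A's loop step and initial dict, named for the lemmas
def pvStep (d : PySem.Dict String (List Int)) (p : Int × Char) : PySem.Dict String (List Int) :=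
  if d.contains (String.ofList [p.2]) then
    d.modify (String.ofList [p.2]) [] (fun l => l ++ [p.1])
  else d

def pvInit : PySem.Dict String (List Int) :=
  pvElementos.foldl (fun d vocal => d.insert (String.ofList [vocal]) []) PySem.Dict.empty

def pvKeys : List String := ["a", "e", "i", "o", "u"]

theorem mem_pvKeys_of_mem_pvElementos {c : Char} (hc : c ∈ pvElementos) :
    String.ofList [c] ∈ pvKeys := by
  have h5 : c = 'a' ∨ c = 'e' ∨ c = 'i' ∨ c = 'o' ∨ c = 'u' := by
    simpa [pvElementos] using hc
  rcases h5 with rfl | rfl | rfl | rfl | rfl <;> decide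

theorem keys_pvStep (d : PySem.Dict String (List Int)) (p : Int × Char) :
    (pvStep d p).keys = d.keys := by
  unfold pvStep
  split
  · next h =>
      simp only [PySem.Dict.modify]
      exact PySem.Dict.keys_insert_of_contains _ _ h
  · rfl

theorem keys_foldl_pvStep (l : List (Int × Char)) (d : PySem.Dict String (List Int)) :
    (l.foldl pvStep d).keys = d.keys := by
  induction l generalizing d with
  | nil => rfl
  | cons p t ih => simpa [List.foldl_cons, keys_pvStep] using ih (pvStep d p)

theorem getD_foldl_pvStep (l : List (Int × Char)) (d : PySem.Dict String (List Int))
    (hk : d.keys = pvKeys) (v : Char) (hv : v ∈ pvElementos) :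
    (l.foldl pvStep d).getD (String.ofList [v]) []
      = d.getD (String.ofList [v]) []
        ++ l.filterMap (fun p => if p.2 = v then some p.1 else none) := by
  induction l generalizing d with
  | nil => simp
  | cons p t ih =>
    have hkeys : (pvStep d p).keys = d.keys := keys_pvStep d p
    have ih' := ih (pvStep d p) (hkeys.trans hk)
    rw [List.foldl_cons, ih']
    unfold pvStep
    have hcont : d.contains (String.ofList [p.2])
        = decide (String.ofList [p.2] ∈ pvKeys) := by
      rw [PySem.Dict.contains_eq_decide_mem_keys, hk]
    by_cases hmem : String.ofList [p.2] ∈ pvKeys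
    · rw [hcont]
      simp only [hmem, decide_true, if_true]
      rw [PySem.Dict.getD_modify]
      by_cases hvc : p.2 = v
      · subst hvc
        simp
      · have hne : String.ofList [v] ≠ String.ofList [p.2] := by
          intro h; exact hvc (ofList_singleton_inj.mp h).symm
        simp [hne, hvc]
    · rw [hcont]
      simp only [hmem, decide_false]
      have hvc : p.2 ≠ v := by
        intro h; subst h
        exact hmem (mem_pvKeys_of_mem_pvElementos hv)
      simp [hvc]

theorem items_foldl_pvStep (l : List (Int × Char)) :
    (l.foldl pvStep pvInit).items
      = pvElementos.map (fun vocal =>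
          (String.ofList [vocal],
           l.filterMap (fun p => if p.2 = vocal then some p.1 else none))) := by
  have hk0 : pvInit.keys = pvKeys := by decide
  have hnodup : (l.foldl pvStep pvInit).keys.Nodup := by
    rw [keys_foldl_pvStep, hk0]; decide
  rw [PySem.Dict.items_eq_map_keys _ hnodup ([] : List Int), keys_foldl_pvStep, hk0]
  have hget : ∀ v ∈ pvElementos,
      (l.foldl pvStep pvInit).getD (String.ofList [v]) []
        = l.filterMap (fun p => if p.2 = v then some p.1 else none) := by
    intro v hv
    rw [getD_foldl_pvStep l pvInit hk0 v hv]
    have h0 : pvInit.getD (String.ofList [v]) [] = [] := by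
      have h5 : v = 'a' ∨ v = 'e' ∨ v = 'i' ∨ v = 'o' ∨ v = 'u' := by
        simpa [pvElementos] using hv
      rcases h5 with rfl | rfl | rfl | rfl | rfl <;> decide
    rw [h0, List.nil_append]
  simp only [pvKeys, pvElementos, List.map_cons, List.map_nil]
  rw [hget 'a' (by decide), hget 'e' (by decide), hget 'i' (by decide),
      hget 'o' (by decide), hget 'u' (by decide)]

-- ===== VERDICT (by name: the statement is the Claim_ definition above) =====
theorem ubicadorDeVocales_spec : Claim_equal_ubicadorDeVocales := by
  intro cadena _
  unfold Spec_ubicadorDeVocales ubicadorDeVocales ubicadorDeVocales_alt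
  exact items_foldl_pvStep (PySem.List.enumerate (PySem.Chars.lower cadena.toList) 0)
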